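-- pv_equiv track=rewrite | github.com/viniciushgiovanini/Grafos | Atividade Avaliativas/TP02/createGraphSemiConnect.py | gerarMatrizGAC
-- ===== SOURCE A (Python) =====
-- def gerarMatrizGAC(m, qtdVertices):
--  cont = 1
--  aresta = []
--  Adj = []
--  listaDestino = []
--  while cont <= qtdVertices:
--    listaDestino.append(cont)
--    cont = cont + 1
--
--  cont = 1
--  while cont <= qtdVertices:
--    for item in listaDestino:
--     if cont != item:
--       aresta.append(cont)
--       aresta.append(item)
--       Adj.append(aresta.copy())
--       aresta.clear()
--    m.append(Adj.copy())
--    listaDestino.remove(cont)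
--    Adj.clear()
--    cont = cont + 1
--  return m
-- ===== SOURCE B (Python) =====
-- def gerarMatrizGAC(m, qtdVertices):
--     for k in range(1, qtdVertices + 1):
--         m.append([[k, j] for j in range(k + 1, qtdVertices + 1)])
--     return m
-- ===== Notes on version B (the rewrite author's own statement) =====
-- stated objective: simpler
-- what changed: Drops the listaDestino build/remove bookkeeping and the aresta scratch list entirely, emitting each upper-triangular row directly as a range comprehension appended to m.
import Mathlib
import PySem

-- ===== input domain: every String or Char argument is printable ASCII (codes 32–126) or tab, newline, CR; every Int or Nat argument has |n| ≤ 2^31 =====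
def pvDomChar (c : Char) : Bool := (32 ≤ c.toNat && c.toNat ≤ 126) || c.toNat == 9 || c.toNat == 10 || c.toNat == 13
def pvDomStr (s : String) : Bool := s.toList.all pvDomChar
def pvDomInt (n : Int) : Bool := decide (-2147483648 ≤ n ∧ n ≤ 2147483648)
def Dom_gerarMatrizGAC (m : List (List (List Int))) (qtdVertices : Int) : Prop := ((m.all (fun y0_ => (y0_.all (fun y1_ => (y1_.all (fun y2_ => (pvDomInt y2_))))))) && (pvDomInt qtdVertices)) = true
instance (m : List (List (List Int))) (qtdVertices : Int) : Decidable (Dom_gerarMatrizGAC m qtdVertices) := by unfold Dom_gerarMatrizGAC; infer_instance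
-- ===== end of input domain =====

-- B replaces A's listaDestino build/remove bookkeeping and aresta scratch list with a
-- direct range comprehension per row (simpler; same result). Python A and B both append
-- rows to the passed-in list m in place; the equivalence proved here is about the return value.


-- ===== PORT A =====
-- first while loop: listaDestino.append(cont); cont += 1
def pvBuildDest (cont qtd : Int) (ld : List Int) : List Int :=
  if cont ≤ qtd then pvBuildDest (cont + 1) qtd (ld ++ [cont]) else ld
  termination_by (qtd + 1 - cont).toNat
  decreasing_by omega

-- inner for loop over listaDestino; state = (aresta, Adj)
def pvInner (cont : Int) (ld : List Int) : List Int × List (List Int) :=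
  ld.foldl
    (fun s item =>
      if cont ≠ item then (([] : List Int), s.2 ++ [(s.1 ++ [cont]) ++ [item]]) else s)
    (([] : List Int), ([] : List (List Int)))

-- second while loop
def pvOuter (cont qtd : Int) (ld : List Int) (m : List (List (List Int))) : List (List (List Int)) :=
  if cont ≤ qtd then
    let adj := (pvInner cont ld).2
    let m' := m ++ [adj]
    -- listaDestino.remove(cont); cont is always present here, so Python never raises
    let ld' := (PySem.List.remove? ld cont).getD ld
    pvOuter (cont + 1) qtd ld' m'
  else m
  termination_by (qtd + 1 - cont).toNat
  decreasing_by omega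

def gerarMatrizGAC (m : List (List (List Int))) (qtdVertices : Int) : List (List (List Int)) :=
  pvOuter 1 qtdVertices (pvBuildDest 1 qtdVertices []) m

-- ===== PORT B =====
def gerarMatrizGAC_alt (m : List (List (List Int))) (qtdVertices : Int) : List (List (List Int)) :=
  (PySem.List.pyRange 1 (qtdVertices + 1) 1).foldl
    (fun acc k => acc ++ [(PySem.List.pyRange (k + 1) (qtdVertices + 1) 1).map (fun j => [k, j])])
    m

-- ===== PRECONDITION & SPEC =====
def Spec_gerarMatrizGAC (m : List (List (List Int))) (qtdVertices : Int) (out : List (List (List Int))) : Prop := out = gerarMatrizGAC_alt m qtdVertices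
instance (m : List (List (List Int))) (qtdVertices : Int) (out : List (List (List Int))) : Decidable (Spec_gerarMatrizGAC m qtdVertices out) := by unfold Spec_gerarMatrizGAC; infer_instance

-- ===== CLAIM (what is proved, stated in full; the proofs are below) =====
def Claim_equal_gerarMatrizGAC : Prop := ∀ (m : List (List (List Int))) (qtdVertices : Int), Dom_gerarMatrizGAC m qtdVertices → Spec_gerarMatrizGAC m qtdVertices (gerarMatrizGAC m qtdVertices)

-- ===== LEMMAS AND PROOFS =====

theorem pvBuildDest_eq (cont qtd : Int) (ld : List Int) :
    pvBuildDest cont qtd ld = ld ++ PySem.List.pyRange cont (qtd + 1) 1 := by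
  by_cases h : cont ≤ qtd
  · rw [pvBuildDest, if_pos h, pvBuildDest_eq (cont + 1) qtd,
      PySem.List.pyRange_one_cons (show cont < qtd + 1 by omega)]
    simp
  · rw [pvBuildDest, if_neg h, PySem.List.pyRange_one_eq_nil (by omega)]
    simp
  termination_by (qtd + 1 - cont).toNat
  decreasing_by omega

theorem pvInner_fold (cont : Int) (l : List Int) (adj : List (List Int))
    (hne : ∀ x ∈ l, cont ≠ x) :
    l.foldl
      (fun s item =>
        if cont ≠ item then (([] : List Int), s.2 ++ [(s.1 ++ [cont]) ++ [item]]) else s)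
      (([] : List Int), adj)
    = (([] : List Int), adj ++ l.map (fun item => [cont, item])) := by
  induction l generalizing adj with
  | nil => simp
  | cons x t ih =>
    simp only [List.foldl_cons, if_pos (hne x (by simp))]
    rw [ih _ (fun y hy => hne y (by simp [hy]))]
    simp

theorem pvInner_eq (cont qtd : Int) (h : cont ≤ qtd) :
    (pvInner cont (PySem.List.pyRange cont (qtd + 1) 1)).2
    = (PySem.List.pyRange (cont + 1) (qtd + 1) 1).map (fun j => [cont, j]) := by
  unfold pvInner
  rw [PySem.List.pyRange_one_cons (by omega)]
  simp only [List.foldl_cons]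
  rw [if_neg (by simp), pvInner_fold cont _ [] (fun x hx => by
    have := (PySem.List.mem_pyRange_one).1 hx; omega)]
  simp

theorem pvOuter_eq (cont qtd : Int) (m : List (List (List Int))) :
    pvOuter cont qtd (PySem.List.pyRange cont (qtd + 1) 1) m
    = (PySem.List.pyRange cont (qtd + 1) 1).foldl
        (fun acc k => acc ++ [(PySem.List.pyRange (k + 1) (qtd + 1) 1).map (fun j => [k, j])])
        m := by
  by_cases h : cont ≤ qtd
  · rw [pvOuter, if_pos h]
    have hcons : PySem.List.pyRange cont (qtd + 1) 1
        = cont :: PySem.List.pyRange (cont + 1) (qtd + 1) 1 :=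
      PySem.List.pyRange_one_cons (by omega)
    have hrem : (PySem.List.remove? (PySem.List.pyRange cont (qtd + 1) 1) cont).getD
        (PySem.List.pyRange cont (qtd + 1) 1) = PySem.List.pyRange (cont + 1) (qtd + 1) 1 := by
      rw [hcons, PySem.List.remove?_cons_self]; rfl
    simp only [hrem, pvInner_eq cont qtd h]
    rw [pvOuter_eq (cont + 1) qtd]
    conv_rhs => rw [hcons]
    simp
  · rw [pvOuter, if_neg h, PySem.List.pyRange_one_eq_nil (by omega)]
    simp
  termination_by (qtd + 1 - cont).toNat
  decreasing_by omega

-- ===== VERDICT (by name: the statement is the Claim_ definition above) =====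
theorem gerarMatrizGAC_spec : Claim_equal_gerarMatrizGAC := by
  intro m qtd _
  unfold Spec_gerarMatrizGAC gerarMatrizGAC gerarMatrizGAC_alt
  rw [pvBuildDest_eq, List.nil_append, pvOuter_eq]
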